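-- pv_equiv track=rewrite | github.com/MikolajEkiert/pp1 | 12-Test3/mock1/p2.py | f
-- ===== SOURCE A (Python) =====
-- def f(x,y,d):
--     arr=[]
--     for number in range(x,y+1):
--         arr.append(str(number))
--     for element in arr:
--         if d in element:
--             return True
--         else:
--             continue
--     return False
-- ===== SOURCE B (Python) =====
-- def f(x, y, d):
--     # Any n in [x, y] only produces characters "0123456789-" in str(n), so a
--     # pattern d with any other character can never occur; otherwise a single
--     # substring search over the ","-joined corpus decides existence (d cannot
--     # straddle a "," boundary since d never contains ",").
--     if x > y:
--         return False
--     if not all(c.isdigit() or c == "-" for c in d):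
--         return False
--     return d in ",".join(map(str, range(x, y + 1)))
-- ===== Notes on version B (the rewrite author's own statement) =====
-- stated objective: faster
-- what changed: B replaces A's per-number Python-level substring scan by an alphabet prefilter (str(n) only ever contains characters '0123456789-', so any other character in d forces False after O(len(d)) work) followed by a single C-level substring search over the ','-joined corpus of all decimal representations; since d never contains ',', a match cannot straddle a join boundary, which the Lean proof establishes.
import Mathlib
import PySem

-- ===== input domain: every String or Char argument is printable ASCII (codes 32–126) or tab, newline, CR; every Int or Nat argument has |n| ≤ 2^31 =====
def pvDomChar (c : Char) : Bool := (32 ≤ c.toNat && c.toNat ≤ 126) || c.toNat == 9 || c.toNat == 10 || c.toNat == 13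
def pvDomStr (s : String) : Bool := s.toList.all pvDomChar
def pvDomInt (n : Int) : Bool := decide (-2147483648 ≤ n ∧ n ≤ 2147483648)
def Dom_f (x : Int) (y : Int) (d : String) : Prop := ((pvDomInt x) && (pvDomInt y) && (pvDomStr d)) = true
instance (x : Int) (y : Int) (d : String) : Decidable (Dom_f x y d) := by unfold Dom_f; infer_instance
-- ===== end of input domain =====

-- B replaces A's per-number membership scan by an alphabet prefilter (str(n) only ever
-- contains "0123456789-", so any other character in d settles the answer) followed by a
-- single substring search over the ","-joined corpus; d never contains ",", so a match
-- cannot straddle a join boundary.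

-- ===== PORT A =====
-- second loop of A: scan arr, return True on first element containing d
def fScan (d : String) : List String → Bool
  | [] => false
  | element :: rest =>
      if PySem.Str.isIn d element then true else fScan d rest

def f (x : Int) (y : Int) (d : String) : Bool :=
  -- arr = []; for number in range(x, y+1): arr.append(str(number))
  -- (an append-only loop over the range: arr = map str over range(x, y+1))
  let arr := (PySem.List.pyRange x (y + 1) 1).map (fun number => PySem.Int.toStr number)
  fScan d arr

-- ===== PORT B =====
def f_alt (x : Int) (y : Int) (d : String) : Bool :=
  -- if x > y: return False
  if x > y then false
  -- if not all(c.isdigit() or c == "-" for c in d): return False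
  else if !(d.toList.all (fun c => PySem.Chars.isdigit c || c == '-')) then false
  -- return d in ",".join(map(str, range(x, y + 1)))
  else PySem.Str.isIn d
    (PySem.Str.join "," ((PySem.List.pyRange x (y + 1) 1).map (fun n => PySem.Int.toStr n)))

-- ===== PRECONDITION & SPEC =====
def Spec_f (x : Int) (y : Int) (d : String) (out : Bool) : Prop := out = f_alt x y d
instance (x : Int) (y : Int) (d : String) (out : Bool) : Decidable (Spec_f x y d out) := by unfold Spec_f; infer_instance

-- ===== CLAIM (what is proved, stated in full; the proofs are below) =====
def Claim_equal_f : Prop := ∀ (x : Int) (y : Int) (d : String), Dom_f x y d → Spec_f x y d (f x y d)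

-- ===== LEMMAS AND PROOFS =====

-- A's scan is List.any
theorem fScan_eq_any (d : String) (l : List String) :
    fScan d l = l.any (fun e => PySem.Str.isIn d e) := by
  induction l with
  | nil => rfl
  | cons e rest ih => simp [fScan, ih]

-- every character str(n) produces is a decimal digit or '-'
theorem mem_toChars (n : Int) (c : Char) (hc : c ∈ PySem.Int.toChars n) :
    PySem.Chars.isdigit c = true ∨ c = '-' := by
  have hdig : ∀ m : Nat, c ∈ Nat.toDigits 10 m → PySem.Chars.isdigit c = true := by
    intro m hm
    have h := Nat.isDigit_of_mem_toDigits (by omega) (by omega) hm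
    simp only [Char.isDigit] at h
    simp only [PySem.Chars.isdigit, Char.le_def]
    exact h
  unfold PySem.Int.toChars at hc
  split at hc
  · rcases List.mem_cons.mp hc with h | h
    · exact Or.inr h
    · exact Or.inl (hdig _ h)
  · exact Or.inl (hdig _ hc)

-- an occurrence of d (which avoids the separator) in a ++ sep :: b lies in a or in b
theorem infix_split (d a b : List Char) (sep : Char) (hsep : sep ∉ d)
    (h : d <:+: a ++ sep :: b) : d <:+: a ∨ d <:+: b := by
  obtain ⟨s, t, hst⟩ := h
  by_cases h1 : s.length + d.length ≤ a.length
  · left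
    have hp1 : s ++ d <+: a ++ sep :: b := ⟨t, by simpa [List.append_assoc] using hst⟩
    have hp2 : a <+: a ++ sep :: b := List.prefix_append a (sep :: b)
    have hp := List.prefix_of_prefix_length_le hp1 hp2 (by simpa using h1)
    exact ((List.suffix_append s d).isInfix).trans hp.isInfix
  · by_cases h2 : a.length + 1 ≤ s.length
    · right
      have hs1 : d ++ t <:+ a ++ sep :: b := ⟨s, by simpa [List.append_assoc] using hst⟩
      have hs2 : b <:+ a ++ sep :: b := by
        have : (a ++ [sep]) ++ b = a ++ sep :: b := by simp
        exact ⟨a ++ [sep], this⟩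
      have hlen : (d ++ t).length ≤ b.length := by
        have := congrArg List.length hst
        simp at this
        simp
        omega
      have hs := List.suffix_of_suffix_length_le hs1 hs2 hlen
      exact ((List.prefix_append d t).isInfix).trans hs.isInfix
    · exfalso
      apply hsep
      -- the separator position a.length falls inside the copy of d
      have hq : (s ++ (d ++ t))[a.length]? = some sep := by
        rw [← List.append_assoc, hst]
        rw [List.getElem?_append_right (le_refl a.length)]
        simp
      rw [List.getElem?_append_right (by omega : s.length ≤ a.length)] at hq
      rw [List.getElem?_append_left (by omega : a.length - s.length < d.length)] at hq
      exact List.mem_of_getElem? hq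
  -- (h1, h2 : the occurrence starts after s and must overlap position a.length)

-- d (which avoids ',') occurs in the ","-join iff it occurs in some part
theorem infix_join_iff (d : List Char) (hd : ',' ∉ d) :
    ∀ parts : List (List Char), parts ≠ [] →
      (d <:+: PySem.Chars.join [','] parts ↔ ∃ p ∈ parts, d <:+: p) := by
  intro parts
  induction parts with
  | nil => intro h; exact absurd rfl h
  | cons p rest ih =>
    intro _
    cases rest with
    | nil =>
      rw [PySem.Chars.join_singleton]
      simp
    | cons q rest' =>
      rw [PySem.Chars.join_cons_cons]
      constructor
      · intro h
        rw [List.append_assoc] at h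
        have h' : d <:+: p ++ ',' :: PySem.Chars.join [','] (q :: rest') := by
          simpa using h
        rcases infix_split d p _ ',' hd h' with h | h
        · exact ⟨p, by simp, h⟩
        · obtain ⟨r, hr, hdr⟩ := (ih (by simp)).mp h
          exact ⟨r, by simp [hr], hdr⟩
      · rintro ⟨r, hr, hdr⟩
        rcases List.mem_cons.mp hr with rfl | hr
        · exact hdr.trans ((List.prefix_append r _).isInfix.trans
            (List.prefix_append _ _).isInfix)
        · have : d <:+: PySem.Chars.join [','] (q :: rest') :=
            (ih (by simp)).mpr ⟨r, hr, hdr⟩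
          exact this.trans (List.suffix_append _ _).isInfix

-- ===== VERDICT (by name: the statement is the Claim_ definition above) =====
theorem f_spec : Claim_equal_f := by
  intro x y d _
  unfold Spec_f f f_alt
  rw [fScan_eq_any]
  simp only [List.any_map]
  by_cases hxy : x > y
  · rw [if_pos hxy, PySem.List.pyRange_one_eq_nil (by omega)]
    rfl
  · rw [if_neg hxy]
    by_cases hfil : d.toList.all (fun c => PySem.Chars.isdigit c || c == '-') = true
    · rw [hfil]
      simp only [Bool.not_true, Bool.false_eq_true, if_false]
      have hcomma : ',' ∉ d.toList := by
        intro hc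
        have := List.all_eq_true.mp hfil _ hc
        simp [PySem.Chars.isdigit] at this
      rw [Bool.eq_iff_iff, PySem.Str.isIn_eq, PySem.Chars.isIn_iff_infix,
        PySem.Str.toList_join, List.map_map]
      have hsep : (",".toList : List Char) = [','] := rfl
      rw [hsep]
      rw [infix_join_iff d.toList hcomma _
        (by rw [PySem.List.pyRange_one_cons (by omega : x < y + 1)]; simp)]
      simp only [List.any_eq_true, List.mem_map, Function.comp_apply]
      constructor
      · rintro ⟨n, hn, hin⟩
        refine ⟨(PySem.Int.toStr n).toList, ⟨n, hn, rfl⟩, ?_⟩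
        rw [PySem.Str.isIn_eq, PySem.Chars.isIn_iff_infix] at hin
        exact hin
      · rintro ⟨p, ⟨n, hn, hp⟩, hdp⟩
        refine ⟨n, hn, ?_⟩
        rw [PySem.Str.isIn_eq, PySem.Chars.isIn_iff_infix]
        rw [hp]
        exact hdp
    · simp only [Bool.not_eq_true] at hfil
      rw [hfil]
      simp only [Bool.not_false, if_true]
      rw [List.any_eq_false]
      intro n _
      simp only [Function.comp_apply, Bool.not_eq_true]
      obtain ⟨c, hc, hcbad⟩ := List.all_eq_false.mp hfil
      rw [PySem.Str.isIn_eq, PySem.Chars.isIn_eq_false_iff]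
      intro hinf
      have hsub : c ∈ (PySem.Int.toStr n).toList := hinf.subset hc
      rw [PySem.Int.toList_toStr] at hsub
      rcases mem_toChars n c hsub with h | h <;> simp [h] at hcbad
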